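-- pv_equiv track=rewrite | github.com/alexeherron/codewars_solutions | 7kyu/zero_terminated_sum.py | zeroTerm
-- ===== SOURCE A (Python) =====
-- def zeroTerm(string):
--   string = string.split('0')
--   sums = []
--   for item in string:
--     listed = list(item)
--     sum_it = 0
--     for num in listed:
--       sum_it += int(num)
--     sums.append(sum_it)
--   return max(sums)
-- ===== SOURCE B (Python) =====
-- def zeroTerm(string):
--   best = 0
--   current = 0
--   for c in string:
--     if c == '0':
--       current = 0
--     else:
--       current += int(c)
--       if current > best:
--         best = current
--   return best
-- ===== Notes on version B (the rewrite author's own statement) =====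
-- stated objective: simpler
-- what changed: Single streaming pass with a running segment sum and running maximum (reset on '0'), instead of building the split list and a per-segment sums list and taking max at the end.
import Mathlib
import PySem

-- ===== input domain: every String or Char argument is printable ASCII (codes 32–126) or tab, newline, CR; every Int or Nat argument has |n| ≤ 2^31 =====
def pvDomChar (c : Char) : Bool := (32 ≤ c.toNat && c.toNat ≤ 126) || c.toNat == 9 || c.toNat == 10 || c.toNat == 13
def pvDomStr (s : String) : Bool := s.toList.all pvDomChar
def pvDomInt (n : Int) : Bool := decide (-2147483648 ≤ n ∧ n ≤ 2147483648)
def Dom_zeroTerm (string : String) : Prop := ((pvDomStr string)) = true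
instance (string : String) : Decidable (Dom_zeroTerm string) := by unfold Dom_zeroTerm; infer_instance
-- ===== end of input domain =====

-- B replaces A's split-into-segments / per-segment sums list / final max with a single
-- streaming pass keeping a running segment sum and running maximum (objective: simpler).


-- int(num) for a one-character string num (shared port of Python's int() on a char)
def pvIntOfChar (c : Char) : Int := (PySem.Int.ofChars? [c]).getD 0

-- ===== PORT A =====
def zeroTerm (string : String) : Int :=
  let parts := PySem.Chars.splitOn string.toList ['0']      -- string = string.split('0')
  let sums := parts.foldl (fun sums item =>
      let listed := item                                    -- listed = list(item)
      let sum_it := listed.foldl (fun s num => s + pvIntOfChar num) 0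
      sums ++ [sum_it]) []
  -- max(sums): sums is never empty (split always yields at least one piece)
  (PySem.List.max? sums (fun y => y)).getD 0

-- ===== PORT B =====
def zeroTerm_alt (string : String) : Int :=
  (string.toList.foldl (fun (st : Int × Int) c =>
      if c = '0' then (0, st.2)
      else
        let cur := st.1 + pvIntOfChar c
        (cur, max st.2 cur)) (0, 0)).2

-- ===== PRECONDITION & SPEC =====
-- Pre_ excludes exactly the strings containing a non-digit character, on which A's
-- int(num) raises ValueError.
def Pre_zeroTerm (string : String) : Prop :=
  string.toList.all (fun c => PySem.Chars.isdigit c) = true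
instance (string : String) : Decidable (Pre_zeroTerm string) := by unfold Pre_zeroTerm; infer_instance

def pvWitness_zeroTerm : String := "12034"

def Spec_zeroTerm (string : String) (out : Int) : Prop := out = zeroTerm_alt string
instance (string : String) (out : Int) : Decidable (Spec_zeroTerm string out) := by unfold Spec_zeroTerm; infer_instance

-- ===== CLAIM (what is proved, stated in full; the proofs are below) =====
def Claim_equal_zeroTerm : Prop := ∀ (string : String), Dom_zeroTerm string → Pre_zeroTerm string → Spec_zeroTerm string (zeroTerm string)

-- ===== LEMMAS AND PROOFS =====

-- reference splitter: first segment, remaining segments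
def pvSplit : List Char → List Char × List (List Char)
  | [] => ([], [])
  | c :: cs =>
      let p := pvSplit cs
      if c = '0' then ([], p.1 :: p.2) else (c :: p.1, p.2)

def pvDsum (cs : List Char) : Int := cs.foldl (fun s c => s + pvIntOfChar c) 0

theorem pvGo_eq (fuel : Nat) (l cur : List Char) (acc : List (List Char))
    (h : l.length < fuel) :
    PySem.Chars.splitOn.go ['0'] fuel l cur acc =
      acc.reverse ++ ((cur.reverse ++ (pvSplit l).1) :: (pvSplit l).2) := by
  induction fuel generalizing l cur acc with
  | zero => omega
  | succ fuel ih =>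
    rw [PySem.Chars.splitOn.go.eq_def]
    cases l with
    | nil => simp [pvSplit]
    | cons c rest =>
      by_cases hc : c = '0'
      · subst hc
        simp only [List.isPrefixOf, BEq.rfl, Bool.true_and, if_pos, List.length_cons,
          List.length_nil, List.drop_succ_cons, List.drop_zero]
        rw [ih rest [] (cur.reverse :: acc) (by simpa using Nat.lt_of_succ_lt_succ h)]
        simp [pvSplit]
      · have hpre : (['0'].isPrefixOf (c :: rest)) = false := by
          simp [List.isPrefixOf]; exact fun h' => hc h'.symm
        simp only [hpre, Bool.false_eq_true, if_false]
        rw [ih rest (c :: cur) acc (by simpa using Nat.lt_of_succ_lt_succ h)]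
        simp [pvSplit, hc]

theorem pvSplitOn_eq (cs : List Char) :
    PySem.Chars.splitOn cs ['0'] = (pvSplit cs).1 :: (pvSplit cs).2 := by
  unfold PySem.Chars.splitOn
  rw [pvGo_eq _ _ _ _ (Nat.lt_succ_self _)]
  simp

theorem pvFoldl_append_map (f : List Char → Int) (l : List (List Char)) (acc : List Int) :
    l.foldl (fun a x => a ++ [f x]) acc = acc ++ l.map f := by
  induction l generalizing acc with
  | nil => simp
  | cons x t ih => simp [ih]

theorem pvDsum_shift (cs : List Char) (s : Int) :
    cs.foldl (fun a c => a + pvIntOfChar c) s = s + pvDsum cs := by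
  induction cs generalizing s with
  | nil => simp [pvDsum]
  | cons c t ih => rw [List.foldl_cons, ih]; conv_rhs => rw [pvDsum, List.foldl_cons, ih]
                   ring

theorem pvDigit_cases (c : Char) (h : PySem.Chars.isdigit c = true) :
    c ∈ ['0','1','2','3','4','5','6','7','8','9'] := by
  simp only [PySem.Chars.isdigit, Bool.and_eq_true, decide_eq_true_eq] at h
  obtain ⟨h1, h2⟩ := h
  have hn1 : 48 ≤ c.toNat := h1
  have hn2 : c.toNat ≤ 57 := h2
  have hc : Char.ofNat c.toNat = c := Char.ofNat_toNat c
  have hcases : c.toNat = 48 ∨ c.toNat = 49 ∨ c.toNat = 50 ∨ c.toNat = 51 ∨ c.toNat = 52 ∨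
      c.toNat = 53 ∨ c.toNat = 54 ∨ c.toNat = 55 ∨ c.toNat = 56 ∨ c.toNat = 57 := by omega
  rcases hcases with h|h|h|h|h|h|h|h|h|h <;> rw [← hc, h] <;> decide

theorem pvIntOfChar_nonneg (c : Char) (h : PySem.Chars.isdigit c = true) :
    0 ≤ pvIntOfChar c := by
  have := pvDigit_cases c h
  fin_cases this <;> decide

theorem pvDsum_nonneg (cs : List Char) (h : ∀ c ∈ cs, PySem.Chars.isdigit c = true) :
    0 ≤ pvDsum cs := by
  induction cs with
  | nil => simp [pvDsum]
  | cons c t ih =>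
    rw [pvDsum, List.foldl_cons, pvDsum_shift]
    have h1 := pvIntOfChar_nonneg c (h c (by simp))
    have h2 := ih (fun c hc => h c (by simp [hc]))
    omega

theorem pvSplit_mem (cs : List Char) :
    (∀ c ∈ (pvSplit cs).1, c ∈ cs) ∧ (∀ seg ∈ (pvSplit cs).2, ∀ c ∈ seg, c ∈ cs) := by
  induction cs with
  | nil => exact ⟨by simp [pvSplit], by simp [pvSplit]⟩
  | cons c t ih =>
    obtain ⟨ih1, ih2⟩ := ih
    by_cases hc : c = '0'
    · refine ⟨by simp [pvSplit, hc], ?_⟩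
      intro seg hseg d hd
      simp only [pvSplit, hc, if_true] at hseg
      rcases List.mem_cons.mp hseg with h1 | h1
      · exact List.mem_cons_of_mem _ (ih1 d (h1 ▸ hd))
      · exact List.mem_cons_of_mem _ (ih2 seg h1 d hd)
    · refine ⟨?_, ?_⟩
      · intro d hd
        simp only [pvSplit, hc, if_false] at hd
        rcases List.mem_cons.mp hd with h1 | h1
        · simp [h1]
        · exact List.mem_cons_of_mem _ (ih1 d h1)
      · intro seg hseg d hd
        simp only [pvSplit, hc, if_false] at hseg
        exact List.mem_cons_of_mem _ (ih2 seg hseg d hd)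

-- the streaming fold computes max over best and all (offset) segment sums
theorem pvB_fold (cs : List Char) (cur best : Int)
    (hd : ∀ c ∈ cs, PySem.Chars.isdigit c = true)
    (h0 : 0 ≤ cur) (hcb : cur ≤ best) :
    (cs.foldl (fun (st : Int × Int) c =>
        if c = '0' then (0, st.2)
        else
          let cur' := st.1 + pvIntOfChar c
          (cur', max st.2 cur')) (cur, best)).2 =
      List.foldl max best ((cur + pvDsum (pvSplit cs).1) :: (pvSplit cs).2.map pvDsum) := by
  induction cs generalizing cur best with
  | nil =>
    simp only [List.foldl_nil, pvSplit, List.map_nil, List.foldl_cons]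
    have h1 : pvDsum ([] : List Char) = 0 := rfl
    rw [h1]
    omega
  | cons c t ih =>
    by_cases hc : c = '0'
    · subst hc
      rw [List.foldl_cons]
      simp only [reduceIte]
      rw [ih 0 best (fun d hdm => hd d (by simp [hdm])) le_rfl (le_trans h0 hcb)]
      simp only [pvSplit, reduceIte, List.map_cons, List.foldl_cons, zero_add]
      have h1 : pvDsum ([] : List Char) = 0 := rfl
      rw [h1]
      congr 1
      omega
    · rw [List.foldl_cons]
      simp only [hc, reduceIte]
      have hdc := pvIntOfChar_nonneg c (hd c (by simp))
      rw [ih (cur + pvIntOfChar c) (max best (cur + pvIntOfChar c))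
            (fun d hdm => hd d (by simp [hdm])) (by omega) (le_max_right _ _)]
      simp only [pvSplit, hc, reduceIte, List.foldl_cons]
      have hs0 : 0 ≤ pvDsum (pvSplit t).1 :=
        pvDsum_nonneg _ (fun d hdm => hd d (List.mem_cons_of_mem _ ((pvSplit_mem t).1 d hdm)))
      have hds : pvDsum (c :: (pvSplit t).1) = pvIntOfChar c + pvDsum (pvSplit t).1 := by
        rw [pvDsum, List.foldl_cons, pvDsum_shift]; ring
      rw [hds]
      congr 1
      omega

-- ===== VERDICT (by name: the statement is the Claim_ definition above) =====
theorem zeroTerm_spec : Claim_equal_zeroTerm := by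
  intro string _ hpre
  simp only [Spec_zeroTerm, zeroTerm, zeroTerm_alt]
  simp only [Pre_zeroTerm, List.all_eq_true] at hpre
  rw [pvSplitOn_eq]
  rw [pvFoldl_append_map (fun item => item.foldl (fun s num => s + pvIntOfChar num) 0)]
  rw [List.nil_append, List.map_cons, PySem.List.max?_id_cons]
  rw [pvB_fold string.toList 0 0 hpre le_rfl le_rfl]
  simp only [List.foldl_cons, zero_add, Option.getD_some]
  have hs0 : 0 ≤ pvDsum (pvSplit string.toList).1 :=
    pvDsum_nonneg _ (fun d hdm => hpre d ((pvSplit_mem string.toList).1 d hdm))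
  rw [max_eq_right hs0]
  rfl
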